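-- pv_equiv track=rewrite | github.com/vrvrakk/VKK_Attention | Attention.py | categorize_conflicting_trials
-- ===== SOURCE A (Python) =====
-- def categorize_conflicting_trials(trials_dur1, trials_dur2):
--     # now creating the rolling window:
--     equal_trials = []
--     previous_trials = []
--     next_trials = []
--
--     # Populate the collections based on conditions
--     for index1, trial1, t1_onset, _, t1_offset in trials_dur1:
--         for index2, trial2, t2_onset, _, t2_offset in trials_dur2:
--             if t1_onset <= t2_offset and t1_offset >= t2_onset:
--                 if trial1 == trial2:
--                     equal_trials.append((index1, trial1, index2, trial2))
--                 if index2 > 0 and trial1 == trials_dur2[index2 - 1][1]: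
--                     previous_trials.append((index1, trial1, index2 - 1, trials_dur2[index2 - 1][1]))
--                 if index2 < len(trials_dur2) - 1 and trial1 == trials_dur2[index2 + 1][1]:
--                     next_trials.append((index1, trial1, index2 + 1, trials_dur2[index2 + 1][1]))
--     return equal_trials, previous_trials, next_trials
-- ===== SOURCE B (Python) =====
-- def categorize_conflicting_trials(trials_dur1, trials_dur2):
--     n = len(trials_dur2)
--     # Pass 1: index trials_dur2 by trial value.  For each entry, register under the
--     # matching key the candidate record (window onset, window offset, out index, out trial)
--     # in one of three slots (equal / previous / next).
--     buckets = {}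
--     for index2, trial2, t2_onset, _, t2_offset in trials_dur2:
--         buckets.setdefault(trial2, ([], [], []))[0].append((t2_onset, t2_offset, index2, trial2))
--         if index2 > 0:
--             p = trials_dur2[index2 - 1][1]
--             buckets.setdefault(p, ([], [], []))[1].append((t2_onset, t2_offset, index2 - 1, p))
--         if index2 < n - 1:
--             q = trials_dur2[index2 + 1][1]
--             buckets.setdefault(q, ([], [], []))[2].append((t2_onset, t2_offset, index2 + 1, q))
--     # Pass 2: each trial1 looks up only the candidates whose key equals its own trial
--     # value and keeps those whose window overlaps; no scan over all of trials_dur2.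
--     equal_trials, previous_trials, next_trials = [], [], []
--     for index1, trial1, t1_onset, _, t1_offset in trials_dur1:
--         cands = buckets.get(trial1)
--         if cands is None:
--             continue
--         for on2, off2, j, t in cands[0]:
--             if t1_onset <= off2 and t1_offset >= on2:
--                 equal_trials.append((index1, trial1, j, t))
--         for on2, off2, j, t in cands[1]:
--             if t1_onset <= off2 and t1_offset >= on2:
--                 previous_trials.append((index1, trial1, j, t))
--         for on2, off2, j, t in cands[2]:
--             if t1_onset <= off2 and t1_offset >= on2:
--                 next_trials.append((index1, trial1, j, t))
--     return equal_trials, previous_trials, next_trials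
-- ===== Notes on version B (the rewrite author's own statement) =====
-- stated objective: faster
-- what changed: B replaces A's nested scan by two staged passes: it first builds a hash index over trials_dur2 keyed by trial value (each entry registering equal/previous/next candidate records with their time windows), then each trials_dur1 entry looks up only the candidates with its own trial value and filters them by overlap, so the inner scan over all of trials_dur2 disappears.
-- outside the precondition, e.g. on categorize_conflicting_trials([], [(99, 0, 0, 0, 0)]): A returns ([], [], []), B raises IndexError
import Mathlib
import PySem

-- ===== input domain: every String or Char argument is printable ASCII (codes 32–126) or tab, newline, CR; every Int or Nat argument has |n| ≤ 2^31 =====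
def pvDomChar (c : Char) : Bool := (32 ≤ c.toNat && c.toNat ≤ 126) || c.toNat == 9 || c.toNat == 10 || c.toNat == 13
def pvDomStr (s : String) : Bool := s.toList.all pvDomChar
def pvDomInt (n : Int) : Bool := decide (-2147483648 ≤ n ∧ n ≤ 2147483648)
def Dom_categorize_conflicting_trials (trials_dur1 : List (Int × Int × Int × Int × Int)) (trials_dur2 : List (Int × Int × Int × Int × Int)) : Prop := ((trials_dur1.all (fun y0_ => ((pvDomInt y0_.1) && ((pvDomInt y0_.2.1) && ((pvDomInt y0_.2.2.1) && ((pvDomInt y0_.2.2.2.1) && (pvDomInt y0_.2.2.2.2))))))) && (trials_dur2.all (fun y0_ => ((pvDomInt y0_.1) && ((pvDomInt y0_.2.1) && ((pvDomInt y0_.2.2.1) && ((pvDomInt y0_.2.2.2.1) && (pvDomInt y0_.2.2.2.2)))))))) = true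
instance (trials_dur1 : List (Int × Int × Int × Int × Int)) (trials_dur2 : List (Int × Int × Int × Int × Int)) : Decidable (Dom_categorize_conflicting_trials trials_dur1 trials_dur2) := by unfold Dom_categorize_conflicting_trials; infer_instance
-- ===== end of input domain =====

-- ===== PORT A =====
-- B builds a hash index of trials_dur2 by trial value and then filters only the
-- matching-key candidates per trials_dur1 entry (objective: faster; return value only).
def pvDefault5 : Int × Int × Int × Int × Int := (0, 0, 0, 0, 0)

-- literal port of A: nested loops; the neighbor lookups trials_dur2[index2±1][1] are
-- pyGet? with a default never reached inside Pre_ (Python raises IndexError there).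
def categorize_conflicting_trials (trials_dur1 : List (Int × Int × Int × Int × Int)) (trials_dur2 : List (Int × Int × Int × Int × Int)) : (List (Int × Int × Int × Int)) × (List (Int × Int × Int × Int)) × (List (Int × Int × Int × Int)) :=
  trials_dur1.foldl (fun acc t1 =>
    let (index1, trial1, t1_onset, _, t1_offset) := t1
    trials_dur2.foldl (fun acc2 t2 =>
      let (index2, trial2, t2_onset, _, t2_offset) := t2
      if t1_onset ≤ t2_offset ∧ t1_offset ≥ t2_onset then
        let acc2 := if trial1 = trial2 then
            (acc2.1 ++ [(index1, trial1, index2, trial2)], acc2.2.1, acc2.2.2) else acc2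
        let acc2 := if index2 > 0 ∧ trial1 = ((PySem.List.pyGet? trials_dur2 (index2 - 1)).getD pvDefault5).2.1 then
            (acc2.1, acc2.2.1 ++ [(index1, trial1, index2 - 1, ((PySem.List.pyGet? trials_dur2 (index2 - 1)).getD pvDefault5).2.1)], acc2.2.2) else acc2
        let acc2 := if index2 < (trials_dur2.length : Int) - 1 ∧ trial1 = ((PySem.List.pyGet? trials_dur2 (index2 + 1)).getD pvDefault5).2.1 then
            (acc2.1, acc2.2.1, acc2.2.2 ++ [(index1, trial1, index2 + 1, ((PySem.List.pyGet? trials_dur2 (index2 + 1)).getD pvDefault5).2.1)]) else acc2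
        acc2
      else acc2) acc) ([], [], [])

-- ===== PORT B =====
-- Source B pass 1 loop body: register the entry's equal/previous/next candidate records
-- in the bucket of their key; 'setdefault(k,…)[slot].append(c)' is Dict.modify at k.
def pvBuildStep (trials_dur2 : List (Int × Int × Int × Int × Int)) (n : Int) (d : PySem.Dict Int ((List (Int × Int × Int × Int)) × (List (Int × Int × Int × Int)) × (List (Int × Int × Int × Int)))) (t2 : Int × Int × Int × Int × Int) : PySem.Dict Int ((List (Int × Int × Int × Int)) × (List (Int × Int × Int × Int)) × (List (Int × Int × Int × Int))) :=
  let (index2, trial2, t2_onset, _, t2_offset) := t2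
  let d := d.modify trial2 ([], [], []) (fun b => (b.1 ++ [(t2_onset, t2_offset, index2, trial2)], b.2.1, b.2.2))
  let d := if index2 > 0 then
      let p := ((PySem.List.pyGet? trials_dur2 (index2 - 1)).getD pvDefault5).2.1
      d.modify p ([], [], []) (fun b => (b.1, b.2.1 ++ [(t2_onset, t2_offset, index2 - 1, p)], b.2.2))
    else d
  if index2 < n - 1 then
      let q := ((PySem.List.pyGet? trials_dur2 (index2 + 1)).getD pvDefault5).2.1
      d.modify q ([], [], []) (fun b => (b.1, b.2.1, b.2.2 ++ [(t2_onset, t2_offset, index2 + 1, q)]))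
    else d

def categorize_conflicting_trials_alt (trials_dur1 : List (Int × Int × Int × Int × Int)) (trials_dur2 : List (Int × Int × Int × Int × Int)) : (List (Int × Int × Int × Int)) × (List (Int × Int × Int × Int)) × (List (Int × Int × Int × Int)) :=
  let n : Int := trials_dur2.length
  let buckets := trials_dur2.foldl (pvBuildStep trials_dur2 n) PySem.Dict.empty
  trials_dur1.foldl (fun acc t1 =>
    let (index1, trial1, t1_onset, _, t1_offset) := t1
    match buckets.get? trial1 with
    | none => acc
    | some cands =>
      let acc := cands.1.foldl (fun a c =>
        if t1_onset ≤ c.2.1 ∧ t1_offset ≥ c.1 then (a.1 ++ [(index1, trial1, c.2.2.1, c.2.2.2)], a.2.1, a.2.2) else a) acc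
      let acc := cands.2.1.foldl (fun a c =>
        if t1_onset ≤ c.2.1 ∧ t1_offset ≥ c.1 then (a.1, a.2.1 ++ [(index1, trial1, c.2.2.1, c.2.2.2)], a.2.2) else a) acc
      cands.2.2.foldl (fun a c =>
        if t1_onset ≤ c.2.1 ∧ t1_offset ≥ c.1 then (a.1, a.2.1, a.2.2 ++ [(index1, trial1, c.2.2.1, c.2.2.2)]) else a) acc) ([], [], [])

-- ===== PRECONDITION & SPEC =====
-- Pre_ excludes inputs where some trials_dur2 entry carries a stored index2 outside
-- [-len-1, len], where a neighbor lookup trials_dur2[index2±1] raises IndexError: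
-- A raises on any overlapping pair reaching it, and B's eager pass-1 indexing raises
-- there even when no pair overlaps (so A may still return where B raises).
def Pre_categorize_conflicting_trials (trials_dur1 : List (Int × Int × Int × Int × Int)) (trials_dur2 : List (Int × Int × Int × Int × Int)) : Prop :=
  ∀ t2 ∈ trials_dur2, -((trials_dur2.length : Int) + 1) ≤ t2.1 ∧ t2.1 ≤ (trials_dur2.length : Int)
instance (trials_dur1 : List (Int × Int × Int × Int × Int)) (trials_dur2 : List (Int × Int × Int × Int × Int)) : Decidable (Pre_categorize_conflicting_trials trials_dur1 trials_dur2) := by unfold Pre_categorize_conflicting_trials; infer_instance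

def pvWitness_categorize_conflicting_trials : (List (Int × Int × Int × Int × Int)) × (List (Int × Int × Int × Int × Int)) :=
  ([(0, 1, 0, 0, 5), (1, 2, 4, 0, 7)], [(0, 1, 3, 0, 8), (1, 2, 6, 0, 9)])

def Spec_categorize_conflicting_trials (trials_dur1 : List (Int × Int × Int × Int × Int)) (trials_dur2 : List (Int × Int × Int × Int × Int)) (out : (List (Int × Int × Int × Int)) × (List (Int × Int × Int × Int)) × (List (Int × Int × Int × Int))) : Prop := out = categorize_conflicting_trials_alt trials_dur1 trials_dur2
instance (trials_dur1 : List (Int × Int × Int × Int × Int)) (trials_dur2 : List (Int × Int × Int × Int × Int)) (out : (List (Int × Int × Int × Int)) × (List (Int × Int × Int × Int)) × (List (Int × Int × Int × Int))) : Decidable (Spec_categorize_conflicting_trials trials_dur1 trials_dur2 out) := by unfold Spec_categorize_conflicting_trials; infer_instance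

-- ===== CLAIM (what is proved, stated in full; the proofs are below) =====
def Claim_equal_categorize_conflicting_trials : Prop := ∀ (trials_dur1 : List (Int × Int × Int × Int × Int)) (trials_dur2 : List (Int × Int × Int × Int × Int)), Dom_categorize_conflicting_trials trials_dur1 trials_dur2 → Pre_categorize_conflicting_trials trials_dur1 trials_dur2 → Spec_categorize_conflicting_trials trials_dur1 trials_dur2 (categorize_conflicting_trials trials_dur1 trials_dur2)

-- ===== LEMMAS AND PROOFS =====

-- the candidate record each trials_dur2 entry contributes to bucket k, per slot
def pvFE (k : Int) (t2 : Int × Int × Int × Int × Int) : Option (Int × Int × Int × Int) :=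
  if k = t2.2.1 then some (t2.2.2.1, t2.2.2.2.2, t2.1, t2.2.1) else none

def pvFP (trials_dur2 : List (Int × Int × Int × Int × Int)) (k : Int) (t2 : Int × Int × Int × Int × Int) : Option (Int × Int × Int × Int) :=
  let p := ((PySem.List.pyGet? trials_dur2 (t2.1 - 1)).getD pvDefault5).2.1
  if t2.1 > 0 ∧ k = p then some (t2.2.2.1, t2.2.2.2.2, t2.1 - 1, p) else none

def pvFN (trials_dur2 : List (Int × Int × Int × Int × Int)) (n : Int) (k : Int) (t2 : Int × Int × Int × Int × Int) : Option (Int × Int × Int × Int) :=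
  let q := ((PySem.List.pyGet? trials_dur2 (t2.1 + 1)).getD pvDefault5).2.1
  if t2.1 < n - 1 ∧ k = q then some (t2.2.2.1, t2.2.2.2.2, t2.1 + 1, q) else none

lemma pv_step_getD (td2 : List (Int × Int × Int × Int × Int)) (n : Int)
    (d : PySem.Dict Int ((List (Int × Int × Int × Int)) × (List (Int × Int × Int × Int)) × (List (Int × Int × Int × Int))))
    (t2 : Int × Int × Int × Int × Int) (k : Int) :
    (pvBuildStep td2 n d t2).getD k ([], [], []) =
      ((d.getD k ([], [], [])).1 ++ (pvFE k t2).toList,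
       (d.getD k ([], [], [])).2.1 ++ (pvFP td2 k t2).toList,
       (d.getD k ([], [], [])).2.2 ++ (pvFN td2 n k t2).toList) := by
  obtain ⟨i2, tr2, on2, e2, off2⟩ := t2
  simp only [pvBuildStep, pvFE, pvFP, pvFN]
  split_ifs <;>
    simp_all [PySem.Dict.getD_modify]

lemma pv_build (td2 : List (Int × Int × Int × Int × Int)) (n : Int) :
    ∀ (l : List (Int × Int × Int × Int × Int))
      (d : PySem.Dict Int ((List (Int × Int × Int × Int)) × (List (Int × Int × Int × Int)) × (List (Int × Int × Int × Int))))
      (k : Int),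
    (l.foldl (pvBuildStep td2 n) d).getD k ([], [], []) =
      ((d.getD k ([], [], [])).1 ++ l.filterMap (pvFE k),
       (d.getD k ([], [], [])).2.1 ++ l.filterMap (pvFP td2 k),
       (d.getD k ([], [], [])).2.2 ++ l.filterMap (pvFN td2 n k)) := by
  intro l
  induction l with
  | nil => intro d k; simp
  | cons t2 rest ih =>
    intro d k
    simp only [List.foldl_cons, ih, pv_step_getD, List.filterMap_cons]
    cases hE : pvFE k t2 <;> cases hP : pvFP td2 k t2 <;> cases hN : pvFN td2 n k t2 <;> simp

-- the record each overlapping pair contributes in A, per slot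
def pvAE (t1 t2 : Int × Int × Int × Int × Int) : Option (Int × Int × Int × Int) :=
  if (t1.2.2.1 ≤ t2.2.2.2.2 ∧ t1.2.2.2.2 ≥ t2.2.2.1) ∧ t1.2.1 = t2.2.1 then
    some (t1.1, t1.2.1, t2.1, t2.2.1) else none

def pvAP (td2 : List (Int × Int × Int × Int × Int)) (t1 t2 : Int × Int × Int × Int × Int) : Option (Int × Int × Int × Int) :=
  let p := ((PySem.List.pyGet? td2 (t2.1 - 1)).getD pvDefault5).2.1
  if (t1.2.2.1 ≤ t2.2.2.2.2 ∧ t1.2.2.2.2 ≥ t2.2.2.1) ∧ t2.1 > 0 ∧ t1.2.1 = p then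
    some (t1.1, t1.2.1, t2.1 - 1, p) else none

def pvAN (td2 : List (Int × Int × Int × Int × Int)) (n : Int) (t1 t2 : Int × Int × Int × Int × Int) : Option (Int × Int × Int × Int) :=
  let q := ((PySem.List.pyGet? td2 (t2.1 + 1)).getD pvDefault5).2.1
  if (t1.2.2.1 ≤ t2.2.2.2.2 ∧ t1.2.2.2.2 ≥ t2.2.2.1) ∧ t2.1 < n - 1 ∧ t1.2.1 = q then
    some (t1.1, t1.2.1, t2.1 + 1, q) else none

-- A's inner loop appends, per slot, exactly the pvAE/pvAP/pvAN records
set_option maxHeartbeats 1000000 in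
lemma pv_A_inner (td2full : List (Int × Int × Int × Int × Int)) (t1 : Int × Int × Int × Int × Int) :
    ∀ (l : List (Int × Int × Int × Int × Int))
      (acc : (List (Int × Int × Int × Int)) × (List (Int × Int × Int × Int)) × (List (Int × Int × Int × Int))),
    l.foldl (fun acc2 t2 =>
      let (index2, trial2, t2_onset, _, t2_offset) := t2
      if t1.2.2.1 ≤ t2_offset ∧ t1.2.2.2.2 ≥ t2_onset then
        let acc2 := if t1.2.1 = trial2 then
            (acc2.1 ++ [(t1.1, t1.2.1, index2, trial2)], acc2.2.1, acc2.2.2) else acc2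
        let acc2 := if index2 > 0 ∧ t1.2.1 = ((PySem.List.pyGet? td2full (index2 - 1)).getD pvDefault5).2.1 then
            (acc2.1, acc2.2.1 ++ [(t1.1, t1.2.1, index2 - 1, ((PySem.List.pyGet? td2full (index2 - 1)).getD pvDefault5).2.1)], acc2.2.2) else acc2
        let acc2 := if index2 < (td2full.length : Int) - 1 ∧ t1.2.1 = ((PySem.List.pyGet? td2full (index2 + 1)).getD pvDefault5).2.1 then
            (acc2.1, acc2.2.1, acc2.2.2 ++ [(t1.1, t1.2.1, index2 + 1, ((PySem.List.pyGet? td2full (index2 + 1)).getD pvDefault5).2.1)]) else acc2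
        acc2
      else acc2) acc =
    (acc.1 ++ l.filterMap (pvAE t1),
     acc.2.1 ++ l.filterMap (pvAP td2full t1),
     acc.2.2 ++ l.filterMap (pvAN td2full (td2full.length : Int) t1)) := by
  intro l
  induction l with
  | nil => intro acc; simp
  | cons t2 rest ih =>
    intro acc
    obtain ⟨i2, tr2, on2, e2, off2⟩ := t2
    rw [List.foldl_cons]
    dsimp only
    rw [ih]
    clear ih
    simp only [List.filterMap_cons, pvAE, pvAP, pvAN]
    by_cases hov : (t1.2.2.1 ≤ off2 ∧ t1.2.2.2.2 ≥ on2)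
    · simp only [hov, true_and]
      split_ifs <;> simp_all [List.append_assoc]
    · simp only [if_neg hov]
      split_ifs <;> simp_all

-- a slot fold over a filterMapped candidate list is a filterMap of the composite
lemma pv_fold_slot1 (on1 off1 i1 tr1 : Int) (f : (Int × Int × Int × Int × Int) → Option (Int × Int × Int × Int)) :
    ∀ (l : List (Int × Int × Int × Int × Int))
      (acc : (List (Int × Int × Int × Int)) × (List (Int × Int × Int × Int)) × (List (Int × Int × Int × Int))),
    (l.filterMap f).foldl (fun a c =>
        if on1 ≤ c.2.1 ∧ off1 ≥ c.1 then (a.1 ++ [(i1, tr1, c.2.2.1, c.2.2.2)], a.2.1, a.2.2) else a) acc =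
    (acc.1 ++ l.filterMap (fun x => (f x).bind (fun c =>
        if on1 ≤ c.2.1 ∧ off1 ≥ c.1 then some (i1, tr1, c.2.2.1, c.2.2.2) else none)),
     acc.2.1, acc.2.2) := by
  intro l
  induction l with
  | nil => intro acc; simp
  | cons x rest ih =>
    intro acc
    simp only [List.filterMap_cons]
    cases hx : f x with
    | none => simp [ih]
    | some c =>
      simp only [List.foldl_cons, Option.bind_some]
      rw [ih]
      split_ifs <;> simp

lemma pv_fold_slot2 (on1 off1 i1 tr1 : Int) (f : (Int × Int × Int × Int × Int) → Option (Int × Int × Int × Int)) :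
    ∀ (l : List (Int × Int × Int × Int × Int))
      (acc : (List (Int × Int × Int × Int)) × (List (Int × Int × Int × Int)) × (List (Int × Int × Int × Int))),
    (l.filterMap f).foldl (fun a c =>
        if on1 ≤ c.2.1 ∧ off1 ≥ c.1 then (a.1, a.2.1 ++ [(i1, tr1, c.2.2.1, c.2.2.2)], a.2.2) else a) acc =
    (acc.1,
     acc.2.1 ++ l.filterMap (fun x => (f x).bind (fun c =>
        if on1 ≤ c.2.1 ∧ off1 ≥ c.1 then some (i1, tr1, c.2.2.1, c.2.2.2) else none)),
     acc.2.2) := by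
  intro l
  induction l with
  | nil => intro acc; simp
  | cons x rest ih =>
    intro acc
    simp only [List.filterMap_cons]
    cases hx : f x with
    | none => simp [ih]
    | some c =>
      simp only [List.foldl_cons, Option.bind_some]
      rw [ih]
      split_ifs <;> simp

lemma pv_fold_slot3 (on1 off1 i1 tr1 : Int) (f : (Int × Int × Int × Int × Int) → Option (Int × Int × Int × Int)) :
    ∀ (l : List (Int × Int × Int × Int × Int))
      (acc : (List (Int × Int × Int × Int)) × (List (Int × Int × Int × Int)) × (List (Int × Int × Int × Int))),
    (l.filterMap f).foldl (fun a c =>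
        if on1 ≤ c.2.1 ∧ off1 ≥ c.1 then (a.1, a.2.1, a.2.2 ++ [(i1, tr1, c.2.2.1, c.2.2.2)]) else a) acc =
    (acc.1, acc.2.1,
     acc.2.2 ++ l.filterMap (fun x => (f x).bind (fun c =>
        if on1 ≤ c.2.1 ∧ off1 ≥ c.1 then some (i1, tr1, c.2.2.1, c.2.2.2) else none))) := by
  intro l
  induction l with
  | nil => intro acc; simp
  | cons x rest ih =>
    intro acc
    simp only [List.filterMap_cons]
    cases hx : f x with
    | none => simp [ih]
    | some c =>
      simp only [List.foldl_cons, Option.bind_some]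
      rw [ih]
      split_ifs <;> simp

-- composite of bucket candidate and overlap filter = A's per-pair record
lemma pv_comp_E (t1 t2 : Int × Int × Int × Int × Int) :
    (pvFE t1.2.1 t2).bind (fun c =>
      if t1.2.2.1 ≤ c.2.1 ∧ t1.2.2.2.2 ≥ c.1 then some (t1.1, t1.2.1, c.2.2.1, c.2.2.2) else none) =
    pvAE t1 t2 := by
  simp only [pvFE, pvAE]
  split_ifs <;> simp_all

lemma pv_comp_P (td2 : List (Int × Int × Int × Int × Int)) (t1 t2 : Int × Int × Int × Int × Int) :
    (pvFP td2 t1.2.1 t2).bind (fun c =>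
      if t1.2.2.1 ≤ c.2.1 ∧ t1.2.2.2.2 ≥ c.1 then some (t1.1, t1.2.1, c.2.2.1, c.2.2.2) else none) =
    pvAP td2 t1 t2 := by
  simp only [pvFP, pvAP]
  split_ifs <;> simp_all

lemma pv_comp_N (td2 : List (Int × Int × Int × Int × Int)) (n : Int) (t1 t2 : Int × Int × Int × Int × Int) :
    (pvFN td2 n t1.2.1 t2).bind (fun c =>
      if t1.2.2.1 ≤ c.2.1 ∧ t1.2.2.2.2 ≥ c.1 then some (t1.1, t1.2.1, c.2.2.1, c.2.2.2) else none) =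
    pvAN td2 n t1 t2 := by
  simp only [pvFN, pvAN]
  split_ifs <;> simp_all

-- B's per-trial1 body collects exactly the same per-slot records
lemma pv_B_inner (td2 : List (Int × Int × Int × Int × Int)) (i1 tr1 on1 e1 off1 : Int)
    (acc : (List (Int × Int × Int × Int)) × (List (Int × Int × Int × Int)) × (List (Int × Int × Int × Int))) :
    (match (td2.foldl (pvBuildStep td2 (td2.length : Int)) PySem.Dict.empty).get? tr1 with
     | none => acc
     | some cands =>
       let acc := cands.1.foldl (fun a c =>
         if on1 ≤ c.2.1 ∧ off1 ≥ c.1 then (a.1 ++ [(i1, tr1, c.2.2.1, c.2.2.2)], a.2.1, a.2.2) else a) acc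
       let acc := cands.2.1.foldl (fun a c =>
         if on1 ≤ c.2.1 ∧ off1 ≥ c.1 then (a.1, a.2.1 ++ [(i1, tr1, c.2.2.1, c.2.2.2)], a.2.2) else a) acc
       cands.2.2.foldl (fun a c =>
         if on1 ≤ c.2.1 ∧ off1 ≥ c.1 then (a.1, a.2.1, a.2.2 ++ [(i1, tr1, c.2.2.1, c.2.2.2)]) else a) acc) =
    (acc.1 ++ td2.filterMap (pvAE (i1, tr1, on1, e1, off1)),
     acc.2.1 ++ td2.filterMap (pvAP td2 (i1, tr1, on1, e1, off1)),
     acc.2.2 ++ td2.filterMap (pvAN td2 (td2.length : Int) (i1, tr1, on1, e1, off1))) := by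
  cases hget : (td2.foldl (pvBuildStep td2 (td2.length : Int)) PySem.Dict.empty).get? tr1 with
  | none =>
    have h := pv_build td2 (td2.length : Int) td2 PySem.Dict.empty tr1
    rw [PySem.Dict.getD_of_get?_eq_none _ _ hget] at h
    have hE : td2.filterMap (pvFE tr1) = [] := by
      have := congrArg Prod.fst h; simpa using this.symm
    have hP : td2.filterMap (pvFP td2 tr1) = [] := by
      have := congrArg (fun x => x.2.1) h; simpa using this.symm
    have hN : td2.filterMap (pvFN td2 (td2.length : Int) tr1) = [] := by
      have := congrArg (fun x => x.2.2) h; simpa using this.symm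
    have hE' : td2.filterMap (pvAE (i1, tr1, on1, e1, off1)) = [] := by
      rw [List.filterMap_eq_nil_iff] at hE ⊢
      intro t2 ht2
      rw [← pv_comp_E (i1, tr1, on1, e1, off1) t2]
      simp [hE t2 ht2]
    have hP' : td2.filterMap (pvAP td2 (i1, tr1, on1, e1, off1)) = [] := by
      rw [List.filterMap_eq_nil_iff] at hP ⊢
      intro t2 ht2
      rw [← pv_comp_P td2 (i1, tr1, on1, e1, off1) t2]
      simp [hP t2 ht2]
    have hN' : td2.filterMap (pvAN td2 (td2.length : Int) (i1, tr1, on1, e1, off1)) = [] := by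
      rw [List.filterMap_eq_nil_iff] at hN ⊢
      intro t2 ht2
      rw [← pv_comp_N td2 (td2.length : Int) (i1, tr1, on1, e1, off1) t2]
      simp [hN t2 ht2]
    simp [hE', hP', hN']
  | some cands =>
    have h := pv_build td2 (td2.length : Int) td2 PySem.Dict.empty tr1
    rw [PySem.Dict.getD_of_get?_eq_some _ _ hget] at h
    obtain ⟨cE, cP, cN⟩ := cands
    simp only [PySem.Dict.getD_empty, List.nil_append, Prod.mk.injEq] at h
    obtain ⟨hcE, hcP, hcN⟩ := h
    subst hcE hcP hcN
    dsimp only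
    rw [pv_fold_slot1 on1 off1 i1 tr1 (pvFE tr1) td2 acc]
    rw [pv_fold_slot2 on1 off1 i1 tr1 (pvFP td2 tr1) td2 _]
    rw [pv_fold_slot3 on1 off1 i1 tr1 (pvFN td2 (td2.length : Int) tr1) td2 _]
    simp only [List.filterMap_congr (fun t2 _ => pv_comp_E (i1, tr1, on1, e1, off1) t2),
      List.filterMap_congr (fun t2 _ => pv_comp_P td2 (i1, tr1, on1, e1, off1) t2),
      List.filterMap_congr (fun t2 _ => pv_comp_N td2 (td2.length : Int) (i1, tr1, on1, e1, off1) t2)]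

-- ===== VERDICT (by name: the statement is the Claim_ definition above) =====
theorem categorize_conflicting_trials_spec : Claim_equal_categorize_conflicting_trials := by
  intro td1 td2 _ _
  show categorize_conflicting_trials td1 td2 = categorize_conflicting_trials_alt td1 td2
  unfold categorize_conflicting_trials categorize_conflicting_trials_alt
  congr 1
  funext acc t1
  obtain ⟨i1, tr1, on1, e1, off1⟩ := t1
  exact (pv_A_inner td2 (i1, tr1, on1, e1, off1) td2 acc).trans
    (pv_B_inner td2 i1 tr1 on1 e1 off1 acc).symm
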